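-- pv_equiv track=rewrite | github.com/liupei-wq/Data-Processing-GUI | modules/xes.py | _xes_default_compare_columns
-- ===== SOURCE A (Python) =====
-- def _xes_default_compare_columns(columns: list[str]) -> list[str]:
--     priority = [
--         lambda c: c in ("Intensity", "Average_intensity"),
--         lambda c: c in ("BG1BG2_background", "Average_BG1BG2_background"),
--         lambda c: c in ("Intensity_smoothed", "Average_smoothed"),
--         lambda c: c in ("Intensity_normalized", "Average_normalized"),
--     ]
--     ordered: list[str] = []
--     for matcher in priority:
--         match = next((col for col in columns if matcher(col)), None)
--         if match and match not in ordered: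
--             ordered.append(match)
--     return ordered or columns[:min(3, len(columns))]
-- ===== SOURCE B (Python) =====
-- def _group(col):
--     if col in ("Intensity", "Average_intensity"):
--         return 0
--     if col in ("BG1BG2_background", "Average_BG1BG2_background"):
--         return 1
--     if col in ("Intensity_smoothed", "Average_smoothed"):
--         return 2
--     if col in ("Intensity_normalized", "Average_normalized"):
--         return 3
--     return None
--
--
-- def _xes_default_compare_columns(columns: list[str]) -> list[str]:
--     found = [None, None, None, None]
--     for col in columns:
--         g = _group(col)
--         if g is not None and found[g] is None:
--             found[g] = col
--     ordered = [c for c in found if c is not None]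
--     return ordered or columns[:min(3, len(columns))]
-- ===== Notes on version B (the rewrite author's own statement) =====
-- stated objective: alternative
-- what changed: Replaces four separate scans of columns (one next(...) per priority group) with a single pass that records the first column of each group in a fixed 4-slot table, then emits the slots in priority order.
import Mathlib
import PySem

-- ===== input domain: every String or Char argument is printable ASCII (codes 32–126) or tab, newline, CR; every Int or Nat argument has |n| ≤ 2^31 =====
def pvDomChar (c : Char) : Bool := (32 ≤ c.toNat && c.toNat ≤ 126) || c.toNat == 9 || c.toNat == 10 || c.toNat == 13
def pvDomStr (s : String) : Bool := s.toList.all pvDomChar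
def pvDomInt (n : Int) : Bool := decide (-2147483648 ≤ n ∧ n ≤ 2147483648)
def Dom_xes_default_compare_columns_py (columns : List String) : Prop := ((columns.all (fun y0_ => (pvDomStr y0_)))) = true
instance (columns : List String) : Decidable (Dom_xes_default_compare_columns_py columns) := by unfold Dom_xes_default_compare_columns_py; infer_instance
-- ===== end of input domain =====

-- B replaces A's four separate scans of `columns` with one pass filling a 4-slot table,
-- emitted in priority order (alternative decomposition, same cost class).


-- ===== PORT A =====
-- the four matcher lambdas of A's `priority` list
def pvM0 (c : String) : Bool := c == "Intensity" || c == "Average_intensity"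
def pvM1 (c : String) : Bool := c == "BG1BG2_background" || c == "Average_BG1BG2_background"
def pvM2 (c : String) : Bool := c == "Intensity_smoothed" || c == "Average_smoothed"
def pvM3 (c : String) : Bool := c == "Intensity_normalized" || c == "Average_normalized"

-- one iteration of A's `for matcher in priority` loop body:
-- `match = next((col for col in columns if matcher(col)), None); if match and match not in ordered: ordered.append(match)`
def pvStepA (ordered : List String) (m : Option String) : List String :=
  match m with
  | some s => if (s != "") && !(ordered.contains s) then ordered ++ [s] else ordered
  | none => ordered

def xes_default_compare_columns_py (columns : List String) : List String :=
  let ordered : List String := []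
  let ordered := pvStepA ordered (columns.find? pvM0)
  let ordered := pvStepA ordered (columns.find? pvM1)
  let ordered := pvStepA ordered (columns.find? pvM2)
  let ordered := pvStepA ordered (columns.find? pvM3)
  if ordered.isEmpty then PySem.List.slice columns none (some (min 3 (columns.length : Int))) else ordered

-- ===== PORT B =====
-- Source B's _group: the if-chain returning the priority group index
def pvGroupB (c : String) : Option Nat :=
  if c == "Intensity" || c == "Average_intensity" then some 0
  else if c == "BG1BG2_background" || c == "Average_BG1BG2_background" then some 1
  else if c == "Intensity_smoothed" || c == "Average_smoothed" then some 2
  else if c == "Intensity_normalized" || c == "Average_normalized" then some 3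
  else none

-- one iteration of Source B's single loop: `g = _group(col); if g is not None and found[g] is None: found[g] = col`
def pvStepB (found : List (Option String)) (col : String) : List (Option String) :=
  match pvGroupB col with
  | some g => if (found.getD g none).isNone then found.set g (some col) else found
  | none => found

def xes_default_compare_columns_py_alt (columns : List String) : List String :=
  let found := columns.foldl pvStepB [none, none, none, none]
  let ordered := found.filterMap id
  if ordered.isEmpty then PySem.List.slice columns none (some (min 3 (columns.length : Int))) else ordered

-- ===== PRECONDITION & SPEC =====
def Spec_xes_default_compare_columns_py (columns : List String) (out : List String) : Prop := out = xes_default_compare_columns_py_alt columns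
instance (columns : List String) (out : List String) : Decidable (Spec_xes_default_compare_columns_py columns out) := by unfold Spec_xes_default_compare_columns_py; infer_instance

-- ===== CLAIM (what is proved, stated in full; the proofs are below) =====
def Claim_equal_xes_default_compare_columns_py : Prop := ∀ (columns : List String), Dom_xes_default_compare_columns_py columns → Spec_xes_default_compare_columns_py columns (xes_default_compare_columns_py columns)

-- ===== LEMMAS AND PROOFS =====

-- slot i of the fold is the previous slot, or else the first column of group i
def pvFill (a b : Option String) : Option String :=
  match a with
  | some x => some x
  | none => b

lemma pvFill_none (a : Option String) : pvFill a none = a := by cases a <;> rfl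

lemma pvFoldB_inv (rest : List String) (a b c d : Option String) :
    List.foldl pvStepB [a, b, c, d] rest =
      [pvFill a (rest.find? fun x => pvGroupB x == some 0),
       pvFill b (rest.find? fun x => pvGroupB x == some 1),
       pvFill c (rest.find? fun x => pvGroupB x == some 2),
       pvFill d (rest.find? fun x => pvGroupB x == some 3)] := by
  induction rest generalizing a b c d with
  | nil => simp [pvFill_none]
  | cons x xs ih =>
    simp only [List.foldl_cons, pvStepB]
    rcases h : pvGroupB x with _ | g
    · simp [h, ih]
    · have hg : g = 0 ∨ g = 1 ∨ g = 2 ∨ g = 3 := by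
        unfold pvGroupB at h; split_ifs at h <;> simp_all
      rcases hg with rfl | rfl | rfl | rfl
      · cases a <;> simp [List.getD, List.set, h, ih, pvFill]
      · cases b <;> simp [List.getD, List.set, h, ih, pvFill]
      · cases c <;> simp [List.getD, List.set, h, ih, pvFill]
      · cases d <;> simp [List.getD, List.set, h, ih, pvFill]

-- disjointness of the four literal name groups, and nonemptiness of matched names
lemma pvM_cases0 {c : String} (h : pvM0 c = true) : c = "Intensity" ∨ c = "Average_intensity" := by
  simpa [pvM0] using h
lemma pvM_cases1 {c : String} (h : pvM1 c = true) : c = "BG1BG2_background" ∨ c = "Average_BG1BG2_background" := by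
  simpa [pvM1] using h
lemma pvM_cases2 {c : String} (h : pvM2 c = true) : c = "Intensity_smoothed" ∨ c = "Average_smoothed" := by
  simpa [pvM2] using h
lemma pvM_cases3 {c : String} (h : pvM3 c = true) : c = "Intensity_normalized" ∨ c = "Average_normalized" := by
  simpa [pvM3] using h

-- pvGroupB agrees with the individual matchers (uses disjointness of the literal sets)
lemma pvGroupB_eq0 : (fun c => pvGroupB c == some 0) = pvM0 := by
  funext c; unfold pvGroupB pvM0; split_ifs with h <;> simp_all
lemma pvGroupB_eq1 : (fun c => pvGroupB c == some 1) = pvM1 := by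
  funext c
  unfold pvGroupB; split_ifs with h0 h1 <;> simp_all [pvM1]
  rcases h0 with rfl | rfl <;> simp
lemma pvGroupB_eq2 : (fun c => pvGroupB c == some 2) = pvM2 := by
  funext c
  unfold pvGroupB; split_ifs with h0 h1 h2 <;> simp_all [pvM2]
  · rcases h0 with rfl | rfl <;> simp
  · rcases h1 with rfl | rfl <;> simp
lemma pvGroupB_eq3 : (fun c => pvGroupB c == some 3) = pvM3 := by
  funext c
  unfold pvGroupB; split_ifs with h0 h1 h2 h3 <;> simp_all [pvM3]
  · rcases h0 with rfl | rfl <;> simp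
  · rcases h1 with rfl | rfl <;> simp
  · rcases h2 with rfl | rfl <;> simp

-- A's four sequential appends produce exactly the filterMap of the four first-matches
lemma pvOrderedA_eq (f0 f1 f2 f3 : Option String)
    (h0 : ∀ s, f0 = some s → pvM0 s = true) (h1 : ∀ s, f1 = some s → pvM1 s = true)
    (h2 : ∀ s, f2 = some s → pvM2 s = true) (h3 : ∀ s, f3 = some s → pvM3 s = true) :
    pvStepA (pvStepA (pvStepA (pvStepA [] f0) f1) f2) f3 = List.filterMap id [f0, f1, f2, f3] := by
  rcases f0 with _ | s0 <;> rcases f1 with _ | s1 <;> rcases f2 with _ | s2 <;> rcases f3 with _ | s3 <;>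
    (try rcases pvM_cases0 (h0 _ rfl) with rfl | rfl) <;>
    (try rcases pvM_cases1 (h1 _ rfl) with rfl | rfl) <;>
    (try rcases pvM_cases2 (h2 _ rfl) with rfl | rfl) <;>
    (try rcases pvM_cases3 (h3 _ rfl) with rfl | rfl) <;> rfl

-- ===== VERDICT (by name: the statement is the Claim_ definition above) =====
theorem xes_default_compare_columns_py_spec : Claim_equal_xes_default_compare_columns_py := by
  intro columns _
  unfold Spec_xes_default_compare_columns_py xes_default_compare_columns_py xes_default_compare_columns_py_alt
  rw [pvFoldB_inv, pvGroupB_eq0, pvGroupB_eq1, pvGroupB_eq2, pvGroupB_eq3]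
  have hord := pvOrderedA_eq (columns.find? pvM0) (columns.find? pvM1) (columns.find? pvM2) (columns.find? pvM3)
    (fun s hs => List.find?_some hs) (fun s hs => List.find?_some hs)
    (fun s hs => List.find?_some hs) (fun s hs => List.find?_some hs)
  simp only [hord, pvFill]
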